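-- pv_equiv track=rewrite | github.com/Wmuga/adventofcode | 2020/6/6.py | get_answers_count
-- ===== SOURCE A (Python) =====
-- def get_answers_count(lines:list):
--   answers_count = list()
--   group = set()
--   for line in lines:
--     if len(line)==0:
--       answers_count.append(len(group))
--       group = set()
--       continue
--
--     for answer in line:
--       group.add(answer)
--
--   if len(group)>0:
--     answers_count.append(len(group))
--
--   return answers_count
-- ===== SOURCE B (Python) =====
-- def get_answers_count(lines: list):
--   groups = []
--   current = []
--   for line in lines:
--     if len(line) == 0:
--       groups.append(current)
--       current = []
--     else:
--       current.append(line)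
--   if current:
--     groups.append(current)
--   return [len({answer for line in g for answer in line}) for g in groups]
-- ===== Notes on version B (the rewrite author's own statement) =====
-- stated objective: alternative
-- what changed: B splits the work into two phases: first partition the lines into a list of groups (flushing on empty lines, keeping a trailing non-empty group), then map each group to the size of the set of all its characters, instead of A's single pass that interleaves set accumulation with output appends.
import Mathlib
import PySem

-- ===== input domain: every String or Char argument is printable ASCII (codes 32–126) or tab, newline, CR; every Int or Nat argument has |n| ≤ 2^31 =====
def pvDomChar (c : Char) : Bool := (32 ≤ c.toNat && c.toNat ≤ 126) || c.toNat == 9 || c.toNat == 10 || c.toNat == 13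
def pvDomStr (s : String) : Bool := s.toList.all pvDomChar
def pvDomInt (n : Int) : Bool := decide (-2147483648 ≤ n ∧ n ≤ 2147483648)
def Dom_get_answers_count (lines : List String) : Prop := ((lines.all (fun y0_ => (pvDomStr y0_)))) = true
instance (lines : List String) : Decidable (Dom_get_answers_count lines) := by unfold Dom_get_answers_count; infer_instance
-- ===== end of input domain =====

-- B restructures A's single accumulate-and-emit pass into a partition phase plus a per-group distinct-count mapping (alternative decomposition, same cost).

-- ===== PORT A =====
def get_answers_count (lines : List String) : List Int :=
  let st := lines.foldl
    (fun (st : List Int × PySem.Set Char) line =>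
      if PySem.Str.len line == 0 then
        (st.1 ++ [PySem.Set.len st.2], PySem.Set.empty)
      else
        (st.1, line.toList.foldl (fun g a => PySem.Set.add g a) st.2))
    ([], PySem.Set.empty)
  if PySem.Set.len st.2 > 0 then st.1 ++ [PySem.Set.len st.2] else st.1

-- ===== PORT B =====
def pvSplitGroups : List String → List String → List (List String)
  | [], current => if current.isEmpty then [] else [current]
  | line :: rest, current =>
      if PySem.Str.len line == 0 then current :: pvSplitGroups rest []
      else pvSplitGroups rest (current ++ [line])

def pvGroupCount (g : List String) : Int :=
  PySem.Set.len (PySem.Set.ofList (g.flatMap (fun line => line.toList)))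

def get_answers_count_alt (lines : List String) : List Int :=
  (pvSplitGroups lines []).map pvGroupCount

-- ===== PRECONDITION & SPEC =====
def Spec_get_answers_count (lines : List String) (out : List Int) : Prop := out = get_answers_count_alt lines
instance (lines : List String) (out : List Int) : Decidable (Spec_get_answers_count lines out) := by unfold Spec_get_answers_count; infer_instance

-- ===== CLAIM (what is proved, stated in full; the proofs are below) =====
def Claim_equal_get_answers_count : Prop := ∀ (lines : List String), Dom_get_answers_count lines → Spec_get_answers_count lines (get_answers_count lines)

-- ===== LEMMAS AND PROOFS =====

theorem pv_inner_loop (l : List Char) (s : PySem.Set Char) :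
    l.foldl (fun g a => PySem.Set.add g a) s = PySem.Set.update s l := by
  simp [PySem.Set.update]

theorem pv_setOf_ne_nil (cur : List String) (hne : cur ≠ [])
    (hall : ∀ s ∈ cur, PySem.Str.len s ≠ 0) :
    PySem.Set.ofList (cur.flatMap (fun line => line.toList)) ≠ [] := by
  obtain ⟨s, rest, rfl⟩ := List.exists_cons_of_ne_nil hne
  have hs : PySem.Str.len s ≠ 0 := hall s (by simp)
  have hsl : s.toList ≠ [] := by
    intro h
    apply hs
    simp [PySem.Str.len_eq, h]
  obtain ⟨c, cs, hc⟩ := List.exists_cons_of_ne_nil hsl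
  intro hemp
  have : c ∈ PySem.Set.ofList ((s :: rest).flatMap (fun line => line.toList)) := by
    rw [PySem.Set.mem_ofList]
    simp [hc]
  rw [hemp] at this
  simp at this

theorem pv_len_pos (s : PySem.Set Char) (h : s ≠ []) : PySem.Set.len s > 0 := by
  simp [PySem.Set.len]
  exact List.length_pos_of_ne_nil h

-- main invariant: running A's fold from (acc, set of cur's characters) and finishing
-- equals acc ++ the per-group counts of B's remaining partition
theorem pv_main (lines : List String) : ∀ (acc : List Int) (cur : List String),
    (∀ s ∈ cur, PySem.Str.len s ≠ 0) →
    (let st := lines.foldl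
        (fun (st : List Int × PySem.Set Char) line =>
          if PySem.Str.len line == 0 then
            (st.1 ++ [PySem.Set.len st.2], PySem.Set.empty)
          else
            (st.1, line.toList.foldl (fun g a => PySem.Set.add g a) st.2))
        (acc, PySem.Set.ofList (cur.flatMap (fun line => line.toList)))
      if PySem.Set.len st.2 > 0 then st.1 ++ [PySem.Set.len st.2] else st.1)
    = acc ++ (pvSplitGroups lines cur).map pvGroupCount := by
  induction lines with
  | nil =>
      intro acc cur hall
      simp only [List.foldl_nil, pvSplitGroups]
      by_cases hc : cur = []
      · subst hc
        simp [PySem.Set.len, PySem.Set.ofList]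
      · have hne := pv_setOf_ne_nil cur hc hall
        have hpos := pv_len_pos _ hne
        rw [if_pos hpos]
        simp [List.isEmpty_iff, hc, pvGroupCount]
  | cons line rest ih =>
      intro acc cur hall
      by_cases hl : (PySem.Str.len line == 0) = true
      · simp only [List.foldl_cons, pvSplitGroups, hl, if_true]
        have h := ih (acc ++ [PySem.Set.len (PySem.Set.ofList (cur.flatMap (fun line => line.toList)))]) [] (by simp)
        simp only [List.flatMap_nil, PySem.Set.ofList_nil] at h
        have he : (PySem.Set.empty : PySem.Set Char) = ([] : List Char) := rfl
        rw [he] at h ⊢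
        rw [h]
        simp [pvGroupCount]
      · simp only [List.foldl_cons, pvSplitGroups, if_neg hl]
        rw [pv_inner_loop]
        rw [show PySem.Set.update (PySem.Set.ofList (cur.flatMap (fun line => line.toList))) line.toList
            = PySem.Set.ofList ((cur ++ [line]).flatMap (fun line => line.toList)) by
          rw [← PySem.Set.ofList_append]; simp]
        exact ih acc (cur ++ [line]) (by
          intro s hs
          rcases List.mem_append.mp hs with h | h
          · exact hall s h
          · simp at h; subst h; simpa using hl)

-- ===== VERDICT (by name: the statement is the Claim_ definition above) =====
theorem get_answers_count_spec : Claim_equal_get_answers_count := by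
  intro lines _
  show get_answers_count lines = get_answers_count_alt lines
  have h := pv_main lines [] [] (by simp)
  simpa [get_answers_count, get_answers_count_alt, PySem.Set.ofList, PySem.Set.empty] using h
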